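-- pv_equiv track=rewrite | github.com/MrBrantCode/unitest_baseline | mut_generate/mist_train_taco/taco_1973/solution.py | restore_array_from_deltas
-- ===== SOURCE A (Python) =====
-- def restore_array_from_deltas(t, test_cases):
--     results = []
--
--     for case in test_cases:
--         n, ds = case
--         is_unique = True
--         arr = [ds[0]]
--
--         for d in ds[1:]:
--             if d > 0 and d <= arr[-1]:
--                 is_unique = False
--                 break
--             arr.append(arr[-1] + d)
--
--         if is_unique:
--             results.append(arr)
--         else:
--             results.append([-1])
--
--     return results
-- ===== SOURCE B (Python) =====
-- def _valid(ds):
--     # invalid iff some adjacent running sums satisfy prev < cur <= 2*prev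
--     prev = ds[0]
--     ok = True
--     for d in ds[1:]:
--         cur = prev + d
--         if prev < cur <= 2 * prev:
--             ok = False
--         prev = cur
--     return ok
--
--
-- def _rebuild(ds):
--     # build the array back-to-front, starting from the total sum
--     total = 0
--     for d in ds:
--         total += d
--     out = []
--     for d in reversed(ds):
--         out.append(total)
--         total -= d
--     out.reverse()
--     return out
--
--
-- def restore_array_from_deltas(t, test_cases):
--     return [_rebuild(ds) if _valid(ds) else [-1] for _, ds in test_cases]
-- ===== Notes on version B (the rewrite author's own statement) =====
-- stated objective: alternative
-- what changed: A builds the cumulative array incrementally and breaks on the first delta with d > 0 and d <= arr[-1]; B never builds the array while checking: it validates with a scalar running-sum scan using the equivalent doubling inequality prev < cur <= 2*prev, and only for valid cases reconstructs the array back-to-front from the total sum.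
import Mathlib
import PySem

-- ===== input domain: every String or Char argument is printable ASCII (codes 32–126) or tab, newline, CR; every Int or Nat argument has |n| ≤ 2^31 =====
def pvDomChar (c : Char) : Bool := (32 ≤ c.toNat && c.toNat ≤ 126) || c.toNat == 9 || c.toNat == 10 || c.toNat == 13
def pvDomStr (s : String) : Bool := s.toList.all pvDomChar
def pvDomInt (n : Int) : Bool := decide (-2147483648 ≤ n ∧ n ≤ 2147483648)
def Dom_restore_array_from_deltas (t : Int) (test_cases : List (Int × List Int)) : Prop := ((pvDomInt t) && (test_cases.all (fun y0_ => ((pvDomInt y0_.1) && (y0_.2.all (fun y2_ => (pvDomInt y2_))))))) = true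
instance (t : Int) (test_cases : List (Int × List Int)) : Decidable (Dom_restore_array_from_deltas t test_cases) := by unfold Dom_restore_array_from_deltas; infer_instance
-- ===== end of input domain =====

-- B validates with a scalar running-sum scan (doubling inequality prev < cur ≤ 2*prev, no
-- array built) and reconstructs valid answers back-to-front from the total sum. Objective: alternative.

-- ===== PORT A =====
-- inner 'for d in ds[1:]' loop with state (is_unique, arr); break = return (false, arr)
def pvLoopA : List Int → List Int → Bool × List Int
  | [], arr => (true, arr)
  | d :: rest, arr =>
    if d > 0 ∧ d ≤ PySem.List.pyGetD arr (-1) 0 then (false, arr)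
    else pvLoopA rest (arr ++ [PySem.List.pyGetD arr (-1) 0 + d])

def restore_array_from_deltas (t : Int) (test_cases : List (Int × List Int)) : List (List Int) :=
  test_cases.foldl
    (fun results case =>
      let ds := case.2
      let arr := [PySem.List.pyGetD ds 0 0]   -- ds[0]; Pre_ excludes empty ds (IndexError)
      let r := pvLoopA (PySem.List.slice ds (some 1) none) arr
      results ++ [if r.1 then r.2 else [-1]])
    []

-- ===== PORT B =====
-- _valid: scalar scan over ds[1:] with state (prev, ok)
def pvValid (ds : List Int) : Bool :=
  ((PySem.List.slice ds (some 1) none).foldl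
    (fun (st : Int × Bool) d =>
      let cur := st.1 + d
      (cur, if st.1 < cur ∧ cur ≤ 2 * st.1 then false else st.2))
    (PySem.List.pyGetD ds 0 0, true)).2

-- _rebuild: total-sum loop, then back-to-front construction, then reverse
def pvRebuild (ds : List Int) : List Int :=
  let total := ds.foldl (fun a d => a + d) 0
  ((ds.reverse.foldl (fun (st : List Int × Int) d => (st.1 ++ [st.2], st.2 - d))
    ([], total)).1).reverse

def restore_array_from_deltas_alt (t : Int) (test_cases : List (Int × List Int)) : List (List Int) :=
  test_cases.map (fun case => if pvValid case.2 then pvRebuild case.2 else [-1])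

-- ===== PRECONDITION & SPEC =====
-- Pre_ excludes test cases with an empty delta list, on which A raises IndexError at ds[0] (B does too).
def Pre_restore_array_from_deltas (t : Int) (test_cases : List (Int × List Int)) : Prop :=
  ∀ c ∈ test_cases, c.2 ≠ []
instance (t : Int) (test_cases : List (Int × List Int)) : Decidable (Pre_restore_array_from_deltas t test_cases) := by unfold Pre_restore_array_from_deltas; infer_instance
def pvWitness_restore_array_from_deltas : Int × (List (Int × List Int)) := (1, [(3, [1, 2, 3]), (2, [5, -1])])

def Spec_restore_array_from_deltas (t : Int) (test_cases : List (Int × List Int)) (out : List (List Int)) : Prop := out = restore_array_from_deltas_alt t test_cases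
instance (t : Int) (test_cases : List (Int × List Int)) (out : List (List Int)) : Decidable (Spec_restore_array_from_deltas t test_cases out) := by unfold Spec_restore_array_from_deltas; infer_instance

-- ===== CLAIM (what is proved, stated in full; the proofs are below) =====
def Claim_equal_restore_array_from_deltas : Prop := ∀ (t : Int) (test_cases : List (Int × List Int)), Dom_restore_array_from_deltas t test_cases → Pre_restore_array_from_deltas t test_cases → Spec_restore_array_from_deltas t test_cases (restore_array_from_deltas t test_cases)

-- ===== LEMMAS AND PROOFS =====

-- running-sum list starting from current sum s
def pvGo (s : Int) : List Int → List Int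
  | [] => []
  | d :: rest => (s + d) :: pvGo (s + d) rest

-- A's inner loop in terms of an 'any' over (delta, previous running sum) pairs
theorem pvLoopA_eq (rest : List Int) : ∀ (p : List Int) (s : Int),
    (if (pvLoopA rest (p ++ [s])).1 then (pvLoopA rest (p ++ [s])).2 else [-1]) =
      if (rest.zip (s :: pvGo s rest)).any
          (fun dp => decide (dp.1 > 0) && decide (dp.1 ≤ dp.2)) then [-1]
      else (p ++ [s]) ++ pvGo s rest := by
  induction rest with
  | nil => intro p s; simp [pvLoopA, pvGo]
  | cons d rest ih =>
    intro p s
    simp only [pvLoopA, pvGo, List.zip_cons_cons, List.any_cons,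
      PySem.List.pyGetD_neg_one_append_singleton]
    by_cases h : d > 0 ∧ d ≤ s
    · simp [h]
    · have hb : (decide (d > 0) && decide (d ≤ s)) = false := by
        simp only [Bool.and_eq_false_iff, decide_eq_false_iff_not]
        by_cases h1 : d > 0
        · exact Or.inr (fun h2 => h ⟨h1, h2⟩)
        · exact Or.inl h1
      rw [if_neg h, hb]
      have := ih (p ++ [s]) (s + d)
      simp only [List.append_assoc, List.singleton_append] at this ⊢
      rw [this]
      simp only [Bool.false_or]
      simp

-- B's validation scan equals the negation of the same 'any'
theorem pvValid_fold (rest : List Int) : ∀ (s : Int) (b : Bool),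
    (rest.foldl
      (fun (st : Int × Bool) d =>
        let cur := st.1 + d
        (cur, if st.1 < cur ∧ cur ≤ 2 * st.1 then false else st.2)) (s, b)).2
    = (b && !((rest.zip (s :: pvGo s rest)).any
        (fun dp => decide (dp.1 > 0) && decide (dp.1 ≤ dp.2)))) := by
  induction rest with
  | nil => intro s b; simp
  | cons d rest ih =>
    intro s b
    simp only [List.foldl_cons, pvGo, List.zip_cons_cons, List.any_cons]
    rw [ih]
    have hc : (if s < s + d ∧ s + d ≤ 2 * s then false else b)
        = (b && !(decide (d > 0) && decide (d ≤ s))) := by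
      have h : (s < s + d ∧ s + d ≤ 2 * s) ↔ (d > 0 ∧ d ≤ s) := by omega
      by_cases hd : d > 0 ∧ d ≤ s
      · rw [if_pos (h.mpr hd)]; simp [hd.1, hd.2]
      · rw [if_neg (fun hx => hd (h.mp hx))]
        have : (decide (d > 0) && decide (d ≤ s)) = false := by
          simp only [Bool.and_eq_false_iff, decide_eq_false_iff_not]
          by_cases h1 : d > 0
          · exact Or.inr (fun h2 => hd ⟨h1, h2⟩)
          · exact Or.inl h1
        simp [this]
    rw [hc]
    cases b <;> simp

-- the back-to-front construction produces the running-sum list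
theorem pvRebuild_fold (l : List Int) : ∀ (pref : Int) (acc : List Int),
    l.reverse.foldl (fun (st : List Int × Int) d => (st.1 ++ [st.2], st.2 - d))
      (acc, pref + l.foldl (fun a d => a + d) 0)
    = (acc ++ (pvGo pref l).reverse, pref) := by
  induction l with
  | nil => intro pref acc; simp [pvGo]
  | cons d rest ih =>
    intro pref acc
    have hsum : ∀ (m : List Int) (a : Int),
        m.foldl (fun a d => a + d) a = a + m.foldl (fun a d => a + d) 0 := by
      intro m
      induction m with
      | nil => intro a; simp
      | cons x xs ihx =>
        intro a; simp only [List.foldl_cons]; rw [ihx (a + x), ihx (0 + x)]; ring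
    simp only [List.reverse_cons, List.foldl_append, List.foldl_cons, List.foldl_nil]
    have h1 : pref + List.foldl (fun a d => a + d) (0 + d) rest
        = (pref + d) + List.foldl (fun a d => a + d) 0 rest := by
      rw [hsum rest (0 + d)]; ring
    rw [h1, ih (pref + d) acc]
    simp [pvGo]

-- per-case: A's case body equals B's case body (nonempty ds)
theorem pvCase_eq (ds : List Int) (h : ds ≠ []) :
    (let arr := [PySem.List.pyGetD ds 0 0]
     let r := pvLoopA (PySem.List.slice ds (some 1) none) arr
     if r.1 then r.2 else [-1]) =
    (if pvValid ds then pvRebuild ds else [-1]) := by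
  obtain ⟨d0, rest, rfl⟩ : ∃ d0 rest, ds = d0 :: rest := by
    cases ds with
    | nil => exact absurd rfl h
    | cons a b => exact ⟨a, b, rfl⟩
  simp only [pvValid, pvRebuild, PySem.List.slice_from_one, List.tail_cons,
    PySem.List.pyGetD_zero_cons]
  rw [pvValid_fold rest d0 true]
  have hb : (d0 :: rest).foldl (fun a d => a + d) 0 = 0 + (d0 :: rest).foldl (fun a d => a + d) 0 := by ring_nf
  rw [hb, pvRebuild_fold (d0 :: rest) 0 []]
  have hA := pvLoopA_eq rest [] d0
  simp only [List.nil_append] at hA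
  rw [hA]
  have hgo : pvGo 0 (d0 :: rest) = d0 :: pvGo d0 rest := by simp [pvGo]
  rw [hgo]
  cases hany : (rest.zip (d0 :: pvGo d0 rest)).any
      (fun dp => decide (dp.1 > 0) && decide (dp.1 ≤ dp.2)) <;> simp [hany]

-- A's outer foldl equals B's map
theorem restore_foldl_map (test_cases : List (Int × List Int))
    (hp : ∀ c ∈ test_cases, c.2 ≠ []) : ∀ (acc : List (List Int)),
    test_cases.foldl
      (fun results case =>
        let ds := case.2
        let arr := [PySem.List.pyGetD ds 0 0]
        let r := pvLoopA (PySem.List.slice ds (some 1) none) arr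
        results ++ [if r.1 then r.2 else [-1]]) acc
      = acc ++ test_cases.map (fun case => if pvValid case.2 then pvRebuild case.2 else [-1]) := by
  induction test_cases with
  | nil => intro acc; simp
  | cons c rest ih =>
    intro acc
    simp only [List.foldl_cons, List.map_cons]
    rw [ih (fun x hx => hp x (List.mem_cons_of_mem _ hx))]
    rw [pvCase_eq c.2 (hp c (List.mem_cons_self))]
    simp

-- ===== VERDICT (by name: the statement is the Claim_ definition above) =====
theorem restore_array_from_deltas_spec : Claim_equal_restore_array_from_deltas := by
  intro t test_cases _ hpre
  unfold Spec_restore_array_from_deltas restore_array_from_deltas restore_array_from_deltas_alt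
  rw [restore_foldl_map test_cases hpre []]
  simp
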